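-- pv_equiv track=rewrite | github.com/rubelw/OSSS | src/OSSS/ai/agents/query_data/handlers/behavior_codes_handler.py | _select_behavior_codes_fields
-- ===== SOURCE A (Python) =====
-- from typing import Any, Dict, List, Sequence
--
-- def _select_behavior_codes_fields(
--     rows: Sequence[Dict[str, Any]],
-- ) -> List[str]:
--     """
--     Choose a stable, user-friendly column ordering, but include extra keys.
--     """
--     if not rows:
--         return []
--
--     preferred_order = [
--         "id",
--         "code",
--         "short_code",
--         "description",
--         "category",          # minor, major, etc.
--         "severity_level",
--         "state_code",
--         "is_suspension",
--         "is_expulsion",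
--         "is_referral",
--         "is_active",
--         "created_at",
--         "updated_at",
--     ]
--
--     all_keys: List[str] = []
--     for r in rows:
--         for k in r:
--             if k not in all_keys:
--                 all_keys.append(k)
--
--     ordered = [k for k in preferred_order if k in all_keys]
--     ordered.extend(k for k in all_keys if k not in ordered)
--     return ordered
-- ===== SOURCE B (Python) =====
-- from typing import Any, Dict, List, Sequence
--
--
-- def _select_behavior_codes_fields(
--     rows: Sequence[Dict[str, Any]],
-- ) -> List[str]:
--     """
--     Choose a stable, user-friendly column ordering, but include extra keys.
--
--     Re-implementation: collect the distinct keys in first-appearance order,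
--     then a single stable sort by a preferred-rank map (extras rank last).
--     """
--     if not rows:
--         return []
--
--     preferred_order = [
--         "id",
--         "code",
--         "short_code",
--         "description",
--         "category",
--         "severity_level",
--         "state_code",
--         "is_suspension",
--         "is_expulsion",
--         "is_referral",
--         "is_active",
--         "created_at",
--         "updated_at",
--     ]
--     rank = {k: i for i, k in enumerate(preferred_order)}
--     all_keys = list(dict.fromkeys(k for r in rows for k in r))
--     return sorted(all_keys, key=lambda k: rank.get(k, len(preferred_order)))
-- ===== Notes on version B (the rewrite author's own statement) =====
-- stated objective: faster
-- what changed: Replaces A's two membership-scanning passes (preferred-list filter plus extend-with-not-in-ordered, each testing 'k in <list>') by a dict.fromkeys dedup followed by a single stable sort keyed by a precomputed rank map with extras ranked last.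
import Mathlib
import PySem

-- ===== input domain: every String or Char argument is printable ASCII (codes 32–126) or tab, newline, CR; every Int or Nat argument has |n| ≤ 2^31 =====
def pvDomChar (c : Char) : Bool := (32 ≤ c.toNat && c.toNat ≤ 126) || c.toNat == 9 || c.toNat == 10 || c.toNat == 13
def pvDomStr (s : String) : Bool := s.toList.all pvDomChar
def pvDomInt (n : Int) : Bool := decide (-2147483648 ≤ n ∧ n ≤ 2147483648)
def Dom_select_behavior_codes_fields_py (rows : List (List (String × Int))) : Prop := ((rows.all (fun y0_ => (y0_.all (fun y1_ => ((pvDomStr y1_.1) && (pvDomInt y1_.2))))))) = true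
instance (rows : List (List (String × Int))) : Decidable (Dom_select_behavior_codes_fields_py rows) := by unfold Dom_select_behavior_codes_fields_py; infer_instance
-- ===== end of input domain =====

-- B replaces A's two membership-scanning passes by dedup-then-one-stable-sort keyed
-- by a precomputed rank map (objective: idiomatic; same results, proved equal below).

-- ===== PORT A =====
def pvPreferredA : List String :=
  ["id", "code", "short_code", "description", "category", "severity_level",
   "state_code", "is_suspension", "is_expulsion", "is_referral", "is_active",
   "created_at", "updated_at"]

def select_behavior_codes_fields_py (rows : List (List (String × Int))) : List String :=
  if rows = [] then []
  else
    let all_keys : List String :=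
      rows.foldl (fun acc r =>
        r.foldl (fun acc2 kv => if kv.1 ∈ acc2 then acc2 else acc2 ++ [kv.1]) acc) []
    let ordered : List String := pvPreferredA.filter (fun k => decide (k ∈ all_keys))
    -- 'ordered.extend(k for k in all_keys if k not in ordered)': the generator tests
    -- membership in 'ordered' WHILE extend appends to it, hence a fold over the growing list
    all_keys.foldl (fun ord k => if k ∈ ord then ord else ord ++ [k]) ordered

-- ===== PORT B =====
def pvPreferredB : List String :=
  ["id", "code", "short_code", "description", "category", "severity_level",
   "state_code", "is_suspension", "is_expulsion", "is_referral", "is_active",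
   "created_at", "updated_at"]

def select_behavior_codes_fields_py_alt (rows : List (List (String × Int))) : List String :=
  if rows = [] then []
  else
    -- rank = {k: i for i, k in enumerate(preferred_order)}
    let rank : PySem.Dict String Int :=
      (PySem.List.enumerate pvPreferredB).foldl (fun d p => d.insert p.2 p.1) PySem.Dict.empty
    -- all_keys = list(dict.fromkeys(k for r in rows for k in r))
    let all_keys : List String := PySem.List.dedup (rows.flatMap (fun r => r.map Prod.fst))
    PySem.List.sorted all_keys (fun k => PySem.Dict.getD rank k (pvPreferredB.length : Int)) false

-- ===== PRECONDITION & SPEC =====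
def Spec_select_behavior_codes_fields_py (rows : List (List (String × Int))) (out : List String) : Prop := out = select_behavior_codes_fields_py_alt rows
instance (rows : List (List (String × Int))) (out : List String) : Decidable (Spec_select_behavior_codes_fields_py rows out) := by unfold Spec_select_behavior_codes_fields_py; infer_instance

-- ===== CLAIM (what is proved, stated in full; the proofs are below) =====
def Claim_equal_select_behavior_codes_fields_py : Prop := ∀ (rows : List (List (String × Int))), Dom_select_behavior_codes_fields_py rows → Spec_select_behavior_codes_fields_py rows (select_behavior_codes_fields_py rows)

-- ===== LEMMAS AND PROOFS =====

-- the rank that B's dict assigns to a key, written as a plain if-chain (proof-side only)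
def pvRankFun (k : String) : Int :=
  if k = "id" then 0 else if k = "code" then 1 else if k = "short_code" then 2
  else if k = "description" then 3 else if k = "category" then 4
  else if k = "severity_level" then 5 else if k = "state_code" then 6
  else if k = "is_suspension" then 7 else if k = "is_expulsion" then 8
  else if k = "is_referral" then 9 else if k = "is_active" then 10
  else if k = "created_at" then 11 else if k = "updated_at" then 12 else 13

lemma pvFilterEqSingle (l : List String) (p : String) (h : l.Nodup) :
    l.filter (fun a => decide (a = p)) = if p ∈ l then [p] else [] := by
  induction l with
  | nil => simp
  | cons x t ih =>
    rw [List.nodup_cons] at h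
    by_cases hx : x = p
    · subst hx
      have : t.filter (fun a => decide (a = x)) = [] :=
        List.filter_eq_nil_iff.2 (fun a ha e => h.1 ((by simpa using e) ▸ ha))
      simp [this]
    · simp only [List.filter_cons, hx, decide_false, ih h.2, List.mem_cons,
        or_iff_right (fun e : p = x => hx e.symm)]
      simp

lemma pvInsertByPairwise (key : String → Int) (x : String) (ys : List String)
    (h : ys.Pairwise (fun a b => key a ≤ key b)) :
    (PySem.List.insertBy (fun a b => decide (key a < key b)) x ys).Pairwise
      (fun a b => key a ≤ key b) := by
  induction ys with
  | nil => simp [PySem.List.insertBy]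
  | cons y t ih =>
    rw [List.pairwise_cons] at h
    rw [PySem.List.insertBy]
    by_cases hlt : key x < key y
    · rw [if_pos (by simp [hlt])]
      refine List.pairwise_cons.2 ⟨?_, List.pairwise_cons.2 ⟨h.1, h.2⟩⟩
      intro b hb
      rcases List.mem_cons.1 hb with rfl | hb'
      · omega
      · have := h.1 b hb'; omega
    · rw [if_neg (by simp [hlt])]
      refine List.pairwise_cons.2 ⟨?_, ih h.2⟩
      intro b hb
      rcases (PySem.List.mem_insertBy _ _ _ _).1 hb with rfl | hb'
      · omega
      · exact h.1 b hb'

lemma pvFilterInsertBy (key : String → Int) (v : Int) (x : String) : ∀ (ys : List String),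
    ys.Pairwise (fun a b => key a ≤ key b) →
    (PySem.List.insertBy (fun a b => decide (key a < key b)) x ys).filter
        (fun a => decide (key a = v))
      = ys.filter (fun a => decide (key a = v)) ++ (if key x = v then [x] else []) := by
  intro ys
  induction ys with
  | nil =>
    intro _
    rw [PySem.List.insertBy]
    by_cases hxv : key x = v
    · simp [List.filter_cons, hxv]
    · simp [List.filter_cons, hxv]
  | cons y t ih =>
    intro h
    rw [List.pairwise_cons] at h
    rw [PySem.List.insertBy]
    by_cases hlt : key x < key y
    · rw [if_pos (by simp [hlt])]
      by_cases hxv : key x = v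
      · have hnil : (y :: t).filter (fun a => decide (key a = v)) = [] := by
          apply List.filter_eq_nil_iff.2
          intro a ha e
          rcases List.mem_cons.1 ha with rfl | ha'
          · simp at e; omega
          · have := h.1 a ha'; simp at e; omega
        rw [hnil]
        simp [List.filter_cons, hxv, hnil]
      · simp [List.filter_cons, hxv]
    · rw [if_neg (by simp [hlt])]
      rw [List.filter_cons, List.filter_cons]
      by_cases hyv : key y = v
      · simp only [hyv, decide_true, ih h.2]
        simp
      · simp only [hyv, decide_false, ih h.2]
        simp

lemma pvGrowFoldl (xs : List String) : ∀ (s : List String), xs.Nodup →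
    xs.foldl (fun ord k => if k ∈ ord then ord else ord ++ [k]) s
      = s ++ xs.filter (fun k => decide (k ∉ s)) := by
  induction xs with
  | nil => intro s _; simp
  | cons x t ih =>
    intro s h
    rw [List.nodup_cons] at h
    simp only [List.foldl_cons]
    by_cases hx : x ∈ s
    · rw [if_pos hx, ih s h.2]
      simp [List.filter_cons, hx]
    · rw [if_neg hx, ih (s ++ [x]) h.2]
      simp only [List.filter_cons, hx, not_false_iff, decide_true, List.append_assoc]
      have : t.filter (fun k => decide (k ∉ s ++ [x])) = t.filter (fun k => decide (k ∉ s)) := by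
        apply List.filter_congr
        intro k hk
        have : k ≠ x := fun e => h.1 (e ▸ hk)
        simp [List.mem_append, this]
      rw [this]
      simp

lemma pvInjOfPairwiseLt (f : String → Int) (l : List String)
    (h : l.Pairwise (fun a b => f a < f b)) :
    ∀ a ∈ l, ∀ b ∈ l, f a = f b → a = b := by
  induction l with
  | nil => simp
  | cons x t ih =>
    rw [List.pairwise_cons] at h
    intro a ha b hb e
    rcases List.mem_cons.1 ha with rfl | ha' <;> rcases List.mem_cons.1 hb with rfl | hb'
    · rfl
    · exact absurd e (by have := h.1 b hb'; omega)
    · exact absurd e (by have := h.1 a ha'; omega)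
    · exact ih h.2 a ha' b hb' e

lemma pvFoldlInv (key : String → Int) (v : Int) : ∀ (xs acc : List String),
    acc.Pairwise (fun a b => key a ≤ key b) →
    (xs.foldl (fun a x => PySem.List.insertBy (fun a b => decide (key a < key b)) x a) acc).Pairwise
        (fun a b => key a ≤ key b) ∧
    (xs.foldl (fun a x => PySem.List.insertBy (fun a b => decide (key a < key b)) x a) acc).filter
        (fun a => decide (key a = v))
      = acc.filter (fun a => decide (key a = v)) ++ xs.filter (fun a => decide (key a = v)) := by
  intro xs
  induction xs with
  | nil => intro acc h; exact ⟨h, by simp⟩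
  | cons x t ih =>
    intro acc h
    simp only [List.foldl_cons]
    obtain ⟨h1, h2⟩ := ih _ (pvInsertByPairwise key x acc h)
    refine ⟨h1, ?_⟩
    rw [h2, pvFilterInsertBy key v x acc h, List.filter_cons]
    by_cases hxv : key x = v <;> simp [hxv]

lemma pvSortedFilter (key : String → Int) (xs : List String) (v : Int) :
    (PySem.List.sorted xs key false).filter (fun a => decide (key a = v))
      = xs.filter (fun a => decide (key a = v)) := by
  rw [PySem.List.sorted_eq_foldl_insertBy]
  simpa using (pvFoldlInv key v xs [] (by simp)).2

lemma pvEqOfPairwiseOfFilters (key : String → Int) :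
    ∀ (xs ys : List String),
      xs.Pairwise (fun a b => key a ≤ key b) → ys.Pairwise (fun a b => key a ≤ key b) →
      (∀ v : Int, xs.filter (fun a => decide (key a = v)) = ys.filter (fun a => decide (key a = v))) →
      xs = ys := by
  intro xs
  induction xs with
  | nil =>
    intro ys _ _ hf
    cases ys with
    | nil => rfl
    | cons y u =>
      have := hf (key y)
      simp [List.filter_cons] at this
  | cons x t ih =>
    intro ys hx hy hf
    have hperm : (x :: t).Perm ys := by
      apply List.perm_iff_count.2
      intro a
      have h1 : (x :: t).count a = ((x :: t).filter (fun b => decide (key b = key a))).count a := by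
        rw [List.count_filter]; simp
      have h2 : ys.count a = (ys.filter (fun b => decide (key b = key a))).count a := by
        rw [List.count_filter]; simp
      rw [h1, h2, hf (key a)]
    cases ys with
    | nil => exact absurd hperm.symm (by simp)
    | cons y u =>
      rw [List.pairwise_cons] at hx hy
      have hxy : key x = key y := by
        have hyx : key x ≤ key y := by
          have hym : y ∈ x :: t := hperm.symm.subset (List.mem_cons_self ..)
          rcases List.mem_cons.1 hym with rfl | h'
          · rfl
          · exact hx.1 y h'
        have hxm : x ∈ y :: u := hperm.subset (List.mem_cons_self ..)
        rcases List.mem_cons.1 hxm with h' | h'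
        · rw [h']
        · have := hy.1 x h'; omega
      have hfx := hf (key x)
      rw [List.filter_cons, List.filter_cons] at hfx
      simp only [decide_true, hxy, if_pos] at hfx
      obtain ⟨hxy', _⟩ := List.cons_eq_cons.mp hfx
      subst hxy'
      have htail : t = u := by
        apply ih u hx.2 hy.2
        intro v
        by_cases hv : key x = v
        · have := hf v
          rw [List.filter_cons, List.filter_cons] at this
          simp [hv] at this
          exact this
        · have := hf v
          rw [List.filter_cons, List.filter_cons] at this
          simpa [hv] using this
      rw [htail]

lemma pvRankFunDefault (k : String) (n0 : k ≠ "id") (n1 : k ≠ "code") (n2 : k ≠ "short_code") (n3 : k ≠ "description") (n4 : k ≠ "category") (n5 : k ≠ "severity_level") (n6 : k ≠ "state_code") (n7 : k ≠ "is_suspension") (n8 : k ≠ "is_expulsion") (n9 : k ≠ "is_referral") (n10 : k ≠ "is_active") (n11 : k ≠ "created_at") (n12 : k ≠ "updated_at") : pvRankFun k = 13 := by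
  unfold pvRankFun; rw [if_neg n0, if_neg n1, if_neg n2, if_neg n3, if_neg n4, if_neg n5, if_neg n6, if_neg n7, if_neg n8, if_neg n9, if_neg n10, if_neg n11, if_neg n12]

lemma pvKeyBridge (k : String) :
    PySem.Dict.getD
      ((PySem.List.enumerate pvPreferredB).foldl (fun d p => d.insert p.2 p.1) PySem.Dict.empty)
      k (pvPreferredB.length : Int) = pvRankFun k := by
  have h : ((PySem.List.enumerate pvPreferredB).foldl (fun d p => d.insert p.2 p.1)
      (PySem.Dict.empty : PySem.Dict String Int))
      = PySem.Dict.mk [("id", 0), ("code", 1), ("short_code", 2), ("description", 3),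
        ("category", 4), ("severity_level", 5), ("state_code", 6), ("is_suspension", 7),
        ("is_expulsion", 8), ("is_referral", 9), ("is_active", 10), ("created_at", 11),
        ("updated_at", 12)] := by decide
  rw [h]
  by_cases h0 : k = "id"
  · subst h0; decide
  by_cases h1 : k = "code"
  · subst h1; decide
  by_cases h2 : k = "short_code"
  · subst h2; decide
  by_cases h3 : k = "description"
  · subst h3; decide
  by_cases h4 : k = "category"
  · subst h4; decide
  by_cases h5 : k = "severity_level"
  · subst h5; decide
  by_cases h6 : k = "state_code"
  · subst h6; decide
  by_cases h7 : k = "is_suspension"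
  · subst h7; decide
  by_cases h8 : k = "is_expulsion"
  · subst h8; decide
  by_cases h9 : k = "is_referral"
  · subst h9; decide
  by_cases h10 : k = "is_active"
  · subst h10; decide
  by_cases h11 : k = "created_at"
  · subst h11; decide
  by_cases h12 : k = "updated_at"
  · subst h12; decide
  simp [PySem.Dict.getD, PySem.Dict.get?_mk_cons, pvRankFun, pvPreferredB, Ne.symm h0, Ne.symm h1, Ne.symm h2, Ne.symm h3, Ne.symm h4, Ne.symm h5, Ne.symm h6, Ne.symm h7, Ne.symm h8, Ne.symm h9, Ne.symm h10, Ne.symm h11, Ne.symm h12, h0, h1, h2, h3, h4, h5, h6, h7, h8, h9, h10, h11, h12, PySem.Dict.get?]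

lemma pvAllKeysEq (rows : List (List (String × Int))) :
    rows.foldl (fun acc r =>
        r.foldl (fun acc2 kv => if kv.1 ∈ acc2 then acc2 else acc2 ++ [kv.1]) acc) []
      = PySem.List.dedup (rows.flatMap (fun r => r.map Prod.fst)) := by
  rw [PySem.List.dedup_eq_ofList, PySem.Set.ofList_eq_foldl]
  have hadd : (fun (a : List String) (x : String) => if x ∈ a then a else a ++ [x])
      = PySem.Set.add := by
    funext a x
    simp [PySem.Set.add, PySem.Set.contains, List.elem_eq_contains, List.contains_iff_mem]
  rw [← hadd]
  suffices hgen : ∀ (rs : List (List (String × Int))) (acc : List String),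
      rs.foldl (fun acc r => r.foldl (fun acc2 kv => if kv.1 ∈ acc2 then acc2 else acc2 ++ [kv.1]) acc) acc
        = (rs.flatMap (fun r => r.map Prod.fst)).foldl (fun a x => if x ∈ a then a else a ++ [x]) acc by
    exact hgen rows []
  intro rs
  induction rs with
  | nil => intro acc; simp
  | cons r rs ih =>
    intro acc
    simp only [List.flatMap_cons, List.foldl_cons, List.foldl_append, ih, List.foldl_map]

lemma pvStableSortEq (pref xs : List String) (key : String → Int) (L : Int)
    (hndp : pref.Nodup) (hndx : xs.Nodup)
    (hp : pref.Pairwise (fun a b => key a < key b))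
    (hout : ∀ k, k ∈ pref ↔ key k ≠ L)
    (hle : ∀ k, key k ≤ L) :
    PySem.List.sorted xs key false
      = pref.filter (fun k => decide (k ∈ xs)) ++ xs.filter (fun k => decide (k ∉ pref)) := by
  have hk13 : ∀ k, k ∉ pref → key k = L := by
    intro k hk; by_contra hne; exact hk ((hout k).2 hne)
  apply pvEqOfPairwiseOfFilters key
  · exact PySem.List.sorted_pairwise xs key
  · apply List.pairwise_append.2
    refine ⟨(hp.filter _).imp (fun h => le_of_lt h), ?_, ?_⟩
    · apply List.pairwise_iff_forall_sublist.2
      intro a b hsub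
      have ha := hsub.subset (List.mem_cons_self ..)
      have hb := hsub.subset (List.mem_cons_of_mem _ (List.mem_cons_self ..))
      have ha' := List.of_mem_filter ha
      have hb' := List.of_mem_filter hb
      simp at ha' hb'
      rw [hk13 a ha', hk13 b hb']
    · intro a ha b hb
      have hb' := List.of_mem_filter hb
      simp at hb'
      rw [hk13 b hb']
      exact hle a
  · intro v
    rw [pvSortedFilter, List.filter_append]
    by_cases hv : v = L
    · subst hv
      have h1 : (pref.filter (fun k => decide (k ∈ xs))).filter (fun a => decide (key a = v)) = [] := by
        apply List.filter_eq_nil_iff.2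
        intro a ha he
        have := (hout a).1 (List.of_mem_filter ha |> fun _ => List.mem_of_mem_filter ha)
        simp at he
        exact this he
      have h2 : (xs.filter (fun k => decide (k ∉ pref))).filter (fun a => decide (key a = v))
          = xs.filter (fun k => decide (k ∉ pref)) := by
        apply List.filter_eq_self.2
        intro a ha
        have ha' := List.of_mem_filter ha
        simp at ha'
        simp [hk13 a ha']
      rw [h1, h2, List.nil_append]
      apply List.filter_congr
      intro k hk
      by_cases hkp : k ∈ pref
      · simp [hkp, (hout k).1 hkp]
      · simp [hkp, hk13 k hkp]
    · have h2 : (xs.filter (fun k => decide (k ∉ pref))).filter (fun a => decide (key a = v)) = [] := by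
        apply List.filter_eq_nil_iff.2
        intro a ha he
        have ha' := List.of_mem_filter ha
        simp at ha' he
        exact hv (he.symm.trans (hk13 a ha'))
      rw [h2, List.append_nil]
      by_cases hex : ∃ p ∈ pref, key p = v
      · obtain ⟨p, hpm, hpv⟩ := hex
        have huniq : ∀ a, key a = v ↔ a = p := by
          intro a
          constructor
          · intro he
            by_cases hap : a ∈ pref
            · exact pvInjOfPairwiseLt key pref hp a hap p hpm (he.trans hpv.symm)
            · exact absurd (he.symm.trans (hk13 a hap)) hv
          · rintro rfl; exact hpv
        have hc1 : (pref.filter (fun k => decide (k ∈ xs))).filter (fun a => decide (key a = v))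
            = (pref.filter (fun k => decide (k ∈ xs))).filter (fun a => decide (a = p)) := by
          apply List.filter_congr
          intro a _
          simp [huniq a]
        have hc2 : xs.filter (fun a => decide (key a = v)) = xs.filter (fun a => decide (a = p)) := by
          apply List.filter_congr
          intro a _
          simp [huniq a]
        rw [hc1, hc2, pvFilterEqSingle _ p (hndp.filter _), pvFilterEqSingle _ p hndx]
        have : p ∈ pref.filter (fun k => decide (k ∈ xs)) ↔ p ∈ xs := by
          simp [List.mem_filter, hpm]
        by_cases hpx : p ∈ xs
        · rw [if_pos (this.2 hpx), if_pos hpx]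
        · rw [if_neg (fun h => hpx (this.1 h)), if_neg hpx]
      · have h1 : (pref.filter (fun k => decide (k ∈ xs))).filter (fun a => decide (key a = v)) = [] := by
          apply List.filter_eq_nil_iff.2
          intro a ha he
          exact hex ⟨a, List.mem_of_mem_filter ha, by simpa using he⟩
        have h3 : xs.filter (fun a => decide (key a = v)) = [] := by
          apply List.filter_eq_nil_iff.2
          intro a _ he
          simp at he
          by_cases hap : a ∈ pref
          · exact hex ⟨a, hap, he⟩
          · exact hv (he.symm.trans (hk13 a hap))
        rw [h1, h3]

set_option maxHeartbeats 1000000 in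
lemma pvMain (rows : List (List (String × Int))) :
    select_behavior_codes_fields_py rows = select_behavior_codes_fields_py_alt rows := by
  by_cases hr : rows = []
  · simp [select_behavior_codes_fields_py, select_behavior_codes_fields_py_alt, hr]
  · rw [select_behavior_codes_fields_py, select_behavior_codes_fields_py_alt,
      if_neg hr, if_neg hr]
    simp only [pvAllKeysEq rows]
    have hkey : (fun k => PySem.Dict.getD
        ((PySem.List.enumerate pvPreferredB).foldl (fun d p => d.insert p.2 p.1) PySem.Dict.empty)
        k (pvPreferredB.length : Int)) = pvRankFun := funext pvKeyBridge
    rw [hkey]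
    set all := PySem.List.dedup (rows.flatMap (fun r => r.map Prod.fst)) with hall
    have hndx : all.Nodup := by
      rw [hall, PySem.List.dedup_eq_ofList]; exact PySem.Set.nodup_ofList _
    rw [pvGrowFoldl all _ hndx]
    have hndp : pvPreferredA.Nodup := by decide
    have hpw : pvPreferredA.Pairwise (fun a b => pvRankFun a < pvRankFun b) := by decide
    have hout : ∀ k, k ∈ pvPreferredA ↔ pvRankFun k ≠ 13 := by
      intro k
      constructor
      · intro hk
        simp only [pvPreferredA, List.mem_cons, List.not_mem_nil, or_false] at hk
        rcases hk with rfl|rfl|rfl|rfl|rfl|rfl|rfl|rfl|rfl|rfl|rfl|rfl|rfl <;> decide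
      · intro hne
        by_contra hk
        simp only [pvPreferredA, List.mem_cons, List.not_mem_nil, or_false, not_or] at hk
        obtain ⟨n0,n1,n2,n3,n4,n5,n6,n7,n8,n9,n10,n11,n12⟩ := hk
        exact hne (pvRankFunDefault k n0 n1 n2 n3 n4 n5 n6 n7 n8 n9 n10 n11 n12)
    have hle : ∀ k, pvRankFun k ≤ 13 := by
      intro k
      by_cases h0 : k = "id"
      · subst h0; decide
      by_cases h1 : k = "code"
      · subst h1; decide
      by_cases h2 : k = "short_code"
      · subst h2; decide
      by_cases h3 : k = "description"
      · subst h3; decide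
      by_cases h4 : k = "category"
      · subst h4; decide
      by_cases h5 : k = "severity_level"
      · subst h5; decide
      by_cases h6 : k = "state_code"
      · subst h6; decide
      by_cases h7 : k = "is_suspension"
      · subst h7; decide
      by_cases h8 : k = "is_expulsion"
      · subst h8; decide
      by_cases h9 : k = "is_referral"
      · subst h9; decide
      by_cases h10 : k = "is_active"
      · subst h10; decide
      by_cases h11 : k = "created_at"
      · subst h11; decide
      by_cases h12 : k = "updated_at"
      · subst h12; decide
      rw [pvRankFunDefault k h0 h1 h2 h3 h4 h5 h6 h7 h8 h9 h10 h11 h12]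
    rw [pvStableSortEq pvPreferredA all pvRankFun 13 hndp hndx hpw hout hle]
    congr 1
    apply List.filter_congr
    intro k hk
    have : (k ∈ pvPreferredA.filter (fun k => decide (k ∈ all))) ↔ k ∈ pvPreferredA := by
      simp [List.mem_filter, hk]
    simp [this]

-- ===== VERDICT (by name: the statement is the Claim_ definition above) =====
theorem select_behavior_codes_fields_py_spec : Claim_equal_select_behavior_codes_fields_py := by
  intro rows _
  unfold Spec_select_behavior_codes_fields_py
  exact pvMain rows
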